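-- pv_equiv track=rewrite | github.com/ahmadRagheb/frappe-login-face-detection- | frappe/utils/__init__.py | remove_blanks
-- ===== SOURCE A (Python) =====
-- def remove_blanks(d):
-- 	"""
-- 		Returns d with empty ('' or None) values stripped
-- 	"""
-- 	empty_keys = []
-- 	for key in d:
-- 		if d[key]=='' or d[key]==None:
-- 			# del d[key] raises runtime exception, using a workaround
-- 			empty_keys.append(key)
-- 	for key in empty_keys:
-- 		del d[key]
--
-- 	return d
-- ===== SOURCE B (Python) =====
-- def remove_blanks(d):
-- 	"""
-- 		Returns d with empty ('' or None) values stripped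
-- 	"""
-- 	kept = {k: v for k, v in d.items() if not (v == '' or v == None)}
-- 	d.clear()
-- 	d.update(kept)
-- 	return d
-- ===== Notes on version B (the rewrite author's own statement) =====
-- stated objective: idiomatic
-- what changed: B builds the surviving entries in one filtering dict comprehension and reinstalls them with clear()+update(), instead of A's two-phase accumulate-blank-keys-then-delete loops; the in-place mutation and returned object are preserved.
import Mathlib
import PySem

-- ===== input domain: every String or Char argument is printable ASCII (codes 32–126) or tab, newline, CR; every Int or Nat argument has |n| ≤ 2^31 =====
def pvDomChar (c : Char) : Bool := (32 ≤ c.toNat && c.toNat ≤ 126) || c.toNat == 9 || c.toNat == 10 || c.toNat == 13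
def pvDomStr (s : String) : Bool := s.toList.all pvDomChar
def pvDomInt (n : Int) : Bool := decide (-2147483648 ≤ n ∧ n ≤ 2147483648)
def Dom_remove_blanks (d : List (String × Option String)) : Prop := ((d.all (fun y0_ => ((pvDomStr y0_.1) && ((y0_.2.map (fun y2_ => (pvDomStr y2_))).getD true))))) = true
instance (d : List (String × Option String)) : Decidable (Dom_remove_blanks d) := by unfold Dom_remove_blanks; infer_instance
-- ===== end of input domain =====

-- B replaces A's accumulate-blank-keys-then-delete pair of loops by one filtering dict
-- comprehension reinstalled via clear()+update() (idiomatic); equality is about the returned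
-- dict contents — both mutate d in place to the same final contents.

-- ===== PORT A =====
def remove_blanks (d : List (String × Option String)) : List (String × Option String) :=
  let dd := PySem.Dict.ofList d
  -- first loop: for key in d: if d[key]=='' or d[key]==None: empty_keys.append(key)
  let empty_keys := dd.keys.foldl
    (fun acc key =>
      if dd.get? key == some (some "") || dd.get? key == some none then acc ++ [key] else acc) []
  -- second loop: for key in empty_keys: del d[key]
  (empty_keys.foldl (fun dc key => dc.erase key) dd).items

-- ===== PORT B =====
def remove_blanks_alt (d : List (String × Option String)) : List (String × Option String) :=
  let dd := PySem.Dict.ofList d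
  -- kept = {k: v for k, v in d.items() if not (v == '' or v == None)}
  let kept := PySem.Dict.ofList (dd.items.filter (fun p => !(p.2 == some "" || p.2 == none)))
  -- d.clear(); d.update(kept); return d  — d's contents are now exactly kept's
  kept.items

-- ===== PRECONDITION & SPEC =====
def Spec_remove_blanks (d : List (String × Option String)) (out : List (String × Option String)) : Prop := out = remove_blanks_alt d
instance (d : List (String × Option String)) (out : List (String × Option String)) : Decidable (Spec_remove_blanks d out) := by unfold Spec_remove_blanks; infer_instance

-- ===== CLAIM (what is proved, stated in full; the proofs are below) =====
def Claim_equal_remove_blanks : Prop := ∀ (d : List (String × Option String)), Dom_remove_blanks d → Spec_remove_blanks d (remove_blanks d)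

-- ===== LEMMAS AND PROOFS =====

-- ofList of a list with pairwise-distinct keys keeps the items list unchanged
theorem pv_items_ofList_nodup {ν : Type} (l : List (String × ν))
    (h : (l.map Prod.fst).Nodup) : (PySem.Dict.ofList l).items = l := by
  have := PySem.Dict.items_foldl_insert_fresh (ν := ν) l Prod.fst Prod.snd PySem.Dict.empty
    (fun a _ => by simp [PySem.Dict.contains, PySem.Dict.empty]) h
  simpa [PySem.Dict.ofList, PySem.Dict.update, PySem.Dict.empty] using this

-- folding erase over a list of keys filters all of them out of the items list
theorem pv_foldl_erase {ν : Type} (ks : List String) (dc : PySem.Dict String ν) :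
    (ks.foldl (fun dc k => dc.erase k) dc).items
      = dc.items.filter (fun p => ks.all (fun k => !(p.1 == k))) := by
  induction ks generalizing dc with
  | nil => simp
  | cons k ks ih =>
      rw [List.foldl_cons, ih]
      simp only [PySem.Dict.erase, List.filter_filter]
      apply List.filter_congr
      intro p _
      simp [Bool.and_comm]

theorem remove_blanks_eq_filter (d : List (String × Option String)) :
    remove_blanks d
      = (PySem.Dict.ofList d).items.filter
          (fun p => !(p.2 == some "" || p.2 == none)) := by
  have hnd := PySem.Dict.nodup_keys_ofList d
  simp only [remove_blanks]
  set dd := PySem.Dict.ofList d with hdd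
  have hkeys : dd.keys.foldl
      (fun acc key =>
        if dd.get? key == some (some "") || dd.get? key == some none then acc ++ [key] else acc) []
      = dd.keys.filter (fun key => dd.get? key == some (some "") || dd.get? key == some none) := by
    simpa using PySem.List.foldl_append_if
      (fun key => dd.get? key == some (some "") || dd.get? key == some none) id dd.keys []
  rw [hkeys, pv_foldl_erase]
  apply List.filter_congr
  intro p hp
  have hget : dd.get? p.1 = some p.2 := PySem.Dict.get?_of_mem_items dd (by exact hp) hnd
  have hk : p.1 ∈ dd.keys := by
    unfold PySem.Dict.keys; exact List.mem_map_of_mem hp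
  by_cases hb : (p.2 == some "" || p.2 == none) = true
  · have hmem : p.1 ∈ dd.keys.filter
        (fun key => dd.get? key == some (some "") || dd.get? key == some none) := by
      refine List.mem_filter.mpr ⟨hk, ?_⟩
      simp [hget]
      simpa using hb
    simp only [hb, Bool.not_true]
    simp only [List.all_eq_false]
    exact ⟨p.1, hmem, by simp⟩
  · have hnmem : p.1 ∉ dd.keys.filter
        (fun key => dd.get? key == some (some "") || dd.get? key == some none) := by
      intro hmem
      have := (List.mem_filter.mp hmem).2
      rw [hget] at this
      apply hb
      simpa using this
    simp only [Bool.not_eq_true] at hb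
    simp only [hb, Bool.not_false]
    rw [List.all_eq_true]
    intro k hkmem
    simp only [Bool.not_eq_eq_eq_not, Bool.not_true, beq_eq_false_iff_ne, ne_eq]
    intro hEq
    exact hnmem (hEq ▸ hkmem)

-- ===== VERDICT (by name: the statement is the Claim_ definition above) =====
theorem remove_blanks_spec : Claim_equal_remove_blanks := by
  intro d _
  unfold Spec_remove_blanks
  simp only [remove_blanks_alt]
  rw [remove_blanks_eq_filter]
  have hnd := PySem.Dict.nodup_keys_ofList d
  have hsub : (((PySem.Dict.ofList d).items.filter
      (fun p => !(p.2 == some "" || p.2 == none))).map Prod.fst).Nodup := by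
    have h : ((PySem.Dict.ofList d).items.filter
        (fun p => !(p.2 == some "" || p.2 == none))).Sublist (PySem.Dict.ofList d).items :=
      List.filter_sublist
    exact (h.map Prod.fst).nodup hnd
  exact (pv_items_ofList_nodup _ hsub).symm
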